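-- pv_equiv track=rewrite | github.com/crislanio/LogicCircuitIA | AG_circuito.py | fenotipo
-- ===== SOURCE A (Python) =====
-- portas = 4
--
-- def fenotipo(individuo):
--     #Devolveremos un fenotipo que este caso debe seguir la estructura de un circuito
--     fenotipo = []
--     contadorCapa = 0
--     #Número de camada de la porta, empieza en 1
--     camada = 1
--     #número de porta
--     porta = 1
--     #vamos a parsear os genes del individuo para formar el fenotipo
--     for gen in range(0, len(individuo), 3):
--         #Parseamos el número de tipo de porta al nombre del tipo
--         tipoPorta = tipo_de_porta(individuo[gen])
--
--         fenotipo.append((porta, tipoPorta, camada, [(individuo[gen+1], porta),(individuo[gen+2], porta)]))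
--         porta+=1
--         contadorCapa += 1
--         #Si el contador es igual al número de portas, es decir, se han creado todas las portas de una camada
--
--         if contadorCapa == portas:
--             #Aumenta el número de camada
--             camada+=1
--             #Contador se resetea
--             contadorCapa=0
--     return fenotipo
--
-- def tipo_de_porta(numero):
--     porta = 'NOR'
--     if numero == 1:
--         porta = 'OR'
--     elif numero == 2:
--         porta = 'AND'
--     elif numero == 3:
--         porta = 'NOT'
--     elif numero == 4:
--         porta = 'NAND'
--     elif numero == 5:
--         porta = 'XOR'
--     elif numero == 6:
--         porta == 'XNOR'
--     return porta
-- ===== SOURCE B (Python) =====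
-- portas = 4
--
-- def fenotipo(individuo):
--     # Two staged passes: first peel the gene list into complete triples,
--     # then emit the gates layer by layer (portas gates per layer), the layer
--     # number coming from the outer loop rather than any counter arithmetic.
--     trips = []
--     resto = individuo
--     while resto:
--         trips.append((resto[0], resto[1], resto[2]))
--         resto = resto[3:]
--     fen = []
--     porta = 1
--     camada = 1
--     while trips:
--         layer, trips = trips[:portas], trips[portas:]
--         for (t, a, b) in layer:
--             fen.append((porta, tipo_de_porta(t), camada, [(a, porta), (b, porta)]))
--             porta += 1
--         camada += 1
--     return fen
--
-- def tipo_de_porta(numero):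
--     porta = 'NOR'
--     if numero == 1:
--         porta = 'OR'
--     elif numero == 2:
--         porta = 'AND'
--     elif numero == 3:
--         porta = 'NOT'
--     elif numero == 4:
--         porta = 'NAND'
--     elif numero == 5:
--         porta = 'XOR'
--     elif numero == 6:
--         porta == 'XNOR'
--     return porta
-- ===== Notes on version B (the rewrite author's own statement) =====
-- stated objective: alternative
-- what changed: Replaced the single index loop with running counters by two staged passes: peel the gene list into triples by repeated slicing, then emit gates layer by layer with a nested loop (the outer loop over chunks of `portas` triples supplies the layer number, the inner loop the gates).
import Mathlib
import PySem

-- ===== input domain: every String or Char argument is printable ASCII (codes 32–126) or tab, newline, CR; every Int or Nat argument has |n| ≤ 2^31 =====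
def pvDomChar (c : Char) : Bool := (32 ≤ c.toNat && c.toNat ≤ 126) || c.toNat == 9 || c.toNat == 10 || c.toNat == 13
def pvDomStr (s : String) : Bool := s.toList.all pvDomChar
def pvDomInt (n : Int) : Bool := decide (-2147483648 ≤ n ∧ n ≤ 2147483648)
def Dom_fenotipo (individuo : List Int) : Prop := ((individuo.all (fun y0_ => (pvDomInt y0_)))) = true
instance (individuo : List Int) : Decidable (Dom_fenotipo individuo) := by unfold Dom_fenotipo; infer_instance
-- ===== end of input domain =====

-- B replaces A's single counter-driven index loop by two staged passes — peel the gene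
-- list into triples, then emit the gates layer by layer with a nested loop (objective: alternative).

-- ===== PORT A =====
def portas : Int := 4

def tipo_de_porta (numero : Int) : String :=
  let porta := "NOR"
  if numero == 1 then "OR"
  else if numero == 2 then "AND"
  else if numero == 3 then "NOT"
  else if numero == 4 then "NAND"
  else if numero == 5 then "XOR"
  else if numero == 6 then porta   -- Python's branch is 'porta == "XNOR"', a no-op comparison: porta stays "NOR"
  else porta

-- A's loop body on the state (fenotipo, contadorCapa, camada, porta)
def fenotipoStep (xs : List Int)
    (st : List (Int × String × Int × (List (Int × Int))) × Int × Int × Int) (gen : Int) :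
    List (Int × String × Int × (List (Int × Int))) × Int × Int × Int :=
  let fen := st.1
  let contadorCapa := st.2.1
  let camada := st.2.2.1
  let porta := st.2.2.2
  let tipoPorta := tipo_de_porta (PySem.List.pyGetD xs gen 0)
  let fen := fen ++ [(porta, tipoPorta, camada,
    [(PySem.List.pyGetD xs (gen + 1) 0, porta), (PySem.List.pyGetD xs (gen + 2) 0, porta)])]
  let porta := porta + 1
  let contadorCapa := contadorCapa + 1
  if contadorCapa == portas then (fen, 0, camada + 1, porta)
  else (fen, contadorCapa, camada, porta)

def fenotipo (individuo : List Int) : List (Int × String × Int × (List (Int × Int))) :=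
  ((PySem.List.pyRange 0 individuo.length 3).foldl (fenotipoStep individuo) ([], 0, 1, 1)).1

-- ===== PORT B =====
-- stage 1: 'while resto: trips.append((resto[0], resto[1], resto[2])); resto = resto[3:]'
-- (a non-empty remainder shorter than 3 raises IndexError in Python — outside Pre_)
def chunk3 : List Int → List (Int × Int × Int)
  | t :: a :: b :: resto => (t, a, b) :: chunk3 resto
  | _ => []

-- the inner 'for (t, a, b) in layer' loop, threading the running porta number
def emitLayer (camada : Int) : List (Int × Int × Int) → Int → List (Int × String × Int × (List (Int × Int)))
  | [], _ => []
  | x :: rest, porta =>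
      (porta, tipo_de_porta x.1, camada, [(x.2.1, porta), (x.2.2, porta)]) :: emitLayer camada rest (porta + 1)

-- stage 2: 'while trips: layer, trips = trips[:portas], trips[portas:]; … camada += 1'
-- (portas = 4, so trips[:4]/trips[4:] is the four-cons pattern; a shorter non-empty
-- remainder is its own final layer and trips[4:] is then empty)
def buildLayers : List (Int × Int × Int) → Int → Int → List (Int × String × Int × (List (Int × Int)))
  | [], _, _ => []
  | x1 :: x2 :: x3 :: x4 :: rest, porta, camada =>
      emitLayer camada [x1, x2, x3, x4] porta ++ buildLayers rest (porta + 4) (camada + 1)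
  | resto, porta, camada => emitLayer camada resto porta

def fenotipo_alt (individuo : List Int) : List (Int × String × Int × (List (Int × Int))) :=
  buildLayers (chunk3 individuo) 1 1

-- ===== PRECONDITION & SPEC =====
-- Python A raises IndexError when the gene list's length is not a multiple of 3.
def Pre_fenotipo (individuo : List Int) : Prop := individuo.length % 3 = 0
instance (individuo : List Int) : Decidable (Pre_fenotipo individuo) := by unfold Pre_fenotipo; infer_instance
def pvWitness_fenotipo : List Int := [1, 2, 3]

def Spec_fenotipo (individuo : List Int) (out : List (Int × String × Int × (List (Int × Int)))) : Prop := out = fenotipo_alt individuo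
instance (individuo : List Int) (out : List (Int × String × Int × (List (Int × Int)))) : Decidable (Spec_fenotipo individuo out) := by unfold Spec_fenotipo; infer_instance

-- ===== CLAIM (what is proved, stated in full; the proofs are below) =====
def Claim_equal_fenotipo : Prop := ∀ (individuo : List Int), Dom_fenotipo individuo → Pre_fenotipo individuo → Spec_fenotipo individuo (fenotipo individuo)

-- ===== LEMMAS AND PROOFS =====

-- the k-th gene triple and the gate both programs build from it (proof-only normal form)
def gene (xs : List Int) (i : Nat) : Int := PySem.List.pyGetD xs (i : Int) 0

def mkGate (t3 : Int × Int × Int) (porta camada : Int) : Int × String × Int × (List (Int × Int)) :=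
  (porta, tipo_de_porta t3.1, camada, [(t3.2.1, porta), (t3.2.2, porta)])

def tripAt (xs : List Int) (k : Nat) : Int × Int × Int :=
  (gene xs (3 * k), gene xs (3 * k + 1), gene xs (3 * k + 2))

-- what A's loop body builds from the (index, gen) pair
def gateOfIdx (xs : List Int) (p : Int × Int) : Int × String × Int × (List (Int × Int)) :=
  let porta := p.1 + 1
  (porta, tipo_de_porta (PySem.List.pyGetD xs p.2 0), PySem.Int.floordiv p.1 portas + 1,
   [(PySem.List.pyGetD xs (p.2 + 1) 0, porta), (PySem.List.pyGetD xs (p.2 + 2) 0, porta)])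

-- Loop invariant for A: after k triples the state is (acc, k%4, k/4+1, k+1), and finishing
-- the fold from there appends the gates of the remaining gene indices, enumerated from k.
lemma fenotipo_loop (xs l : List Int) (k : Nat)
    (acc : List (Int × String × Int × (List (Int × Int)))) :
    (l.foldl (fenotipoStep xs) (acc, ((k % 4 : Nat) : Int), ((k / 4 : Nat) : Int) + 1, ((k : Nat) : Int) + 1)).1
      = acc ++ (PySem.List.enumerate l (k : Int)).map (gateOfIdx xs) := by
  induction l generalizing k acc with
  | nil => simp [PySem.List.enumerate]
  | cons g t ih =>
    rw [List.foldl_cons, PySem.List.enumerate_cons, List.map_cons]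
    have hbody : gateOfIdx xs ((k : Int), g) =
        (((k : Nat) : Int) + 1, tipo_de_porta (PySem.List.pyGetD xs g 0), ((k / 4 : Nat) : Int) + 1,
         [(PySem.List.pyGetD xs (g + 1) 0, ((k : Nat) : Int) + 1),
          (PySem.List.pyGetD xs (g + 2) 0, ((k : Nat) : Int) + 1)]) := by
      simp only [gateOfIdx, portas]
      have : PySem.Int.floordiv (k : Int) 4 = ((k / 4 : Nat) : Int) := by
        exact_mod_cast PySem.Int.floordiv_natCast k 4
      rw [this]
    have hk1 : ((k : Int) + 1) = (((k + 1 : Nat)) : Int) := by push_cast; ring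
    by_cases h : k % 4 = 3
    · have hc : ((((k % 4 : Nat) : Int) + 1 == portas)) = true := by
        simp only [portas, beq_iff_eq]; omega
      simp only [fenotipoStep, hc, if_true]
      have hst : (((0 : Int), ((k / 4 : Nat) : Int) + 1 + 1, ((k : Nat) : Int) + 1 + 1) :
          Int × Int × Int) = ((((k + 1) % 4 : Nat) : Int), (((k + 1) / 4 : Nat) : Int) + 1,
          (((k + 1) : Nat) : Int) + 1) := by
        rw [Prod.mk.injEq, Prod.mk.injEq]
        refine ⟨by push_cast; omega, by push_cast; omega, by push_cast; ring⟩
      rw [hst, ih (k + 1), hbody, hk1]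
      simp
    · have hc : ((((k % 4 : Nat) : Int) + 1 == portas)) = false := by
        simp only [portas, beq_eq_false_iff_ne, ne_eq]; omega
      simp only [fenotipoStep, hc, Bool.false_eq_true, if_false]
      have hst : ((((k % 4 : Nat) : Int) + 1, ((k / 4 : Nat) : Int) + 1, ((k : Nat) : Int) + 1 + 1) :
          Int × Int × Int) = ((((k + 1) % 4 : Nat) : Int), (((k + 1) / 4 : Nat) : Int) + 1,
          (((k + 1) : Nat) : Int) + 1) := by
        rw [Prod.mk.injEq, Prod.mk.injEq]
        refine ⟨by push_cast; omega, by push_cast; omega, by push_cast; ring⟩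
      rw [hst, ih (k + 1), hbody, hk1]
      simp

-- (range n).drop m, written as a shifted range
lemma range_drop (n m : Nat) : (List.range n).drop m = (List.range (n - m)).map (m + ·) := by
  apply List.ext_getElem
  · simp
  · intro i h1 h2
    simp [List.getElem_drop]

-- mapping a function over an enumerated map-of-range
lemma map_enumerate_map_range {α β : Type} (m : Nat) (f : Nat → α) (g : Int × α → β) :
    ((PySem.List.enumerate ((List.range m).map f) 0).map g)
      = (List.range m).map (fun (k : Nat) => g (((k : Nat) : Int), f k)) := by
  apply List.ext_getElem
  · simp [PySem.List.length_enumerate]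
  · intro i h1 h2
    rw [List.getElem_map, List.getElem_map, PySem.List.getElem_enumerate, List.getElem_map,
      List.getElem_range]
    norm_num

-- A in normal form: the k-th gate is mkGate (tripAt k) (k+1) (k/4+1)
lemma fenotipo_norm (xs : List Int) (m : Nat) (hm : xs.length = 3 * m) :
    fenotipo xs = (List.range m).map (fun k => mkGate (tripAt xs k) ((k : Int) + 1) (((k / 4 : Nat) : Int) + 1)) := by
  unfold fenotipo
  have h0 := fenotipo_loop xs (PySem.List.pyRange 0 xs.length 3) 0 []
  simp only [Nat.zero_mod, Nat.zero_div, Nat.cast_zero, List.nil_append, zero_add] at h0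
  rw [h0]
  have hr : PySem.List.pyRange 0 (xs.length : Int) 3 = (List.range m).map (fun k => ((3 * k : Nat) : Int)) := by
    rw [PySem.List.pyRange_of_pos 0 (xs.length : Int) (by norm_num)]
    have hcount : (if (0 : Int) < (xs.length : Int) then (((xs.length : Int) - 0 + 3 - 1) / 3).toNat else 0) = m := by
      rcases Nat.eq_zero_or_pos m with h | h
      · simp [hm, h]
      · rw [if_pos (by rw [hm]; push_cast; omega)]
        rw [hm]; push_cast; omega
    rw [hcount]
    apply List.map_congr_left
    intro k _
    push_cast; ring
  rw [hr, map_enumerate_map_range]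
  apply List.map_congr_left
  intro k _
  simp only [gateOfIdx, mkGate, tripAt, gene, portas]
  have hfd : PySem.Int.floordiv ((k : Nat) : Int) 4 = ((k / 4 : Nat) : Int) := by
    exact_mod_cast PySem.Int.floordiv_natCast k 4
  rw [hfd]
  refine Prod.ext rfl (Prod.ext ?_ (Prod.ext rfl ?_))
  · show tipo_de_porta (PySem.List.pyGetD xs ((3 * k : Nat) : Int) 0) = _
    rfl
  · show ([(PySem.List.pyGetD xs (((3 * k : Nat) : Int) + 1) 0, ((k : Int) + 1)),
          (PySem.List.pyGetD xs (((3 * k : Nat) : Int) + 2) 0, ((k : Int) + 1))] : List (Int × Int))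
      = [(PySem.List.pyGetD xs ((3 * k + 1 : Nat) : Int) 0, ((k : Int) + 1)),
         (PySem.List.pyGetD xs ((3 * k + 2 : Nat) : Int) 0, ((k : Int) + 1))]
    have e1 : (((3 * k : Nat) : Int) + 1) = ((3 * k + 1 : Nat) : Int) := by push_cast; ring
    have e2 : (((3 * k : Nat) : Int) + 2) = ((3 * k + 2 : Nat) : Int) := by push_cast; ring
    rw [e1, e2]

-- stage 1 of B: chunk3 produces exactly the triples (tripAt 0, tripAt 1, …)
lemma gene_cons (x : Int) (xs : List Int) (i : Nat) : gene (x :: xs) (i + 1) = gene xs i := by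
  simp only [gene, PySem.List.pyGetD_natCast, List.getD_cons_succ]

lemma chunk3_eq (m : Nat) : ∀ (xs : List Int), xs.length = 3 * m →
    chunk3 xs = (List.range m).map (tripAt xs) := by
  induction m with
  | zero =>
    intro xs h
    rw [List.length_eq_zero_iff.mp h]
    simp [chunk3]
  | succ m ih =>
    intro xs h
    match xs, h with
    | t :: a :: b :: resto, h =>
      have hr : resto.length = 3 * m := by simp at h; omega
      have h0 : tripAt (t :: a :: b :: resto) 0 = (t, a, b) := by
        simp [tripAt, gene, PySem.List.pyGetD_ofNat']
      have hshift : ∀ k : Nat, tripAt (t :: a :: b :: resto) (k + 1) = tripAt resto k := by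
        intro k
        have e1 : 3 * (k + 1) = 3 * k + 1 + 1 + 1 := by omega
        simp only [tripAt, e1, gene_cons]
      rw [List.range_succ_eq_map, List.map_cons, List.map_map, chunk3, ih resto hr]
      congr 1
      · exact h0.symm
      · apply List.map_congr_left
        intro k _
        simp only [Function.comp, Nat.succ_eq_add_one]
        exact (hshift k).symm

-- the four leading indices of range m, for 4 ≤ m
lemma range_decomp (m : Nat) (h : 4 ≤ m) :
    List.range m = 0 :: 1 :: 2 :: 3 :: (List.range (m - 4)).map (4 + ·) := by
  have := (List.take_append_drop 4 (List.range m)).symm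
  rw [this, List.take_range, range_drop, Nat.min_eq_left h]
  rfl

lemma mkGate_congr (t3 : Int × Int × Int) (p p' cam cam' : Int) (hp : p = p') (hc : cam = cam') :
    mkGate t3 p cam = mkGate t3 p' cam' := by rw [hp, hc]

lemma emitLayer_head (x : Int × Int × Int) (rest : List (Int × Int × Int)) (p c : Int) :
    emitLayer c (x :: rest) p = mkGate x p c :: emitLayer c rest (p + 1) := rfl

-- stage 2 of B: the nested layer loop numbers gate 4c+i with layer (4c+i)/4 + 1
lemma buildLayers_eq (m : Nat) : ∀ (c : Nat) (f : Nat → Int × Int × Int),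
    buildLayers ((List.range m).map f) (((4 * c : Nat) : Int) + 1) ((c : Int) + 1)
      = (List.range m).map (fun i => mkGate (f i) (((4 * c + i : Nat) : Int) + 1) ((((4 * c + i) / 4 : Nat) : Int) + 1)) := by
  induction m using Nat.strong_induction_on with
  | _ m ih =>
    intro c f
    rcases Nat.lt_or_ge m 4 with h4 | h4
    · -- a single (possibly empty) final short layer
      interval_cases m
      · simp [buildLayers]
      · rw [show List.range 1 = [0] from rfl]
        simp only [List.map_cons, List.map_nil]
        rw [show buildLayers [f 0] (((4 * c : Nat) : Int) + 1) ((c : Int) + 1)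
              = emitLayer ((c : Int) + 1) [f 0] (((4 * c : Nat) : Int) + 1) from rfl,
          emitLayer_head]
        simp only [emitLayer]
        congr 1
        exact mkGate_congr _ _ _ _ _ (by omega) (by omega)
      · rw [show List.range 2 = [0, 1] from rfl]
        simp only [List.map_cons, List.map_nil]
        rw [show buildLayers [f 0, f 1] (((4 * c : Nat) : Int) + 1) ((c : Int) + 1)
              = emitLayer ((c : Int) + 1) [f 0, f 1] (((4 * c : Nat) : Int) + 1) from rfl,
          emitLayer_head, emitLayer_head]
        simp only [emitLayer]
        congr 1
        · exact mkGate_congr _ _ _ _ _ (by omega) (by omega)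
        congr 1
        exact mkGate_congr _ _ _ _ _ (by omega) (by omega)
      · rw [show List.range 3 = [0, 1, 2] from rfl]
        simp only [List.map_cons, List.map_nil]
        rw [show buildLayers [f 0, f 1, f 2] (((4 * c : Nat) : Int) + 1) ((c : Int) + 1)
              = emitLayer ((c : Int) + 1) [f 0, f 1, f 2] (((4 * c : Nat) : Int) + 1) from rfl,
          emitLayer_head, emitLayer_head, emitLayer_head]
        simp only [emitLayer]
        congr 1
        · exact mkGate_congr _ _ _ _ _ (by omega) (by omega)
        congr 1
        · exact mkGate_congr _ _ _ _ _ (by omega) (by omega)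
        congr 1
        exact mkGate_congr _ _ _ _ _ (by omega) (by omega)
    · rw [range_decomp m h4]
      simp only [List.map_cons, List.map_map]
      rw [buildLayers]
      have hrec : buildLayers ((List.range (m - 4)).map (f ∘ (4 + ·))) ((((4 * c : Nat) : Int) + 1) + 4) (((c : Int) + 1) + 1)
          = (List.range (m - 4)).map (fun j => mkGate ((f ∘ (4 + ·)) j) (((4 * (c + 1) + j : Nat) : Int) + 1) ((((4 * (c + 1) + j) / 4 : Nat) : Int) + 1)) := by
        have e1 : (((4 * c : Nat) : Int) + 1) + 4 = ((4 * (c + 1) : Nat) : Int) + 1 := by push_cast; ring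
        have e2 : ((c : Int) + 1) + 1 = (((c + 1 : Nat)) : Int) + 1 := by push_cast; ring
        rw [e1, e2, ih (m - 4) (by omega) (c + 1) (f ∘ (4 + ·))]
      rw [hrec, emitLayer_head, emitLayer_head, emitLayer_head, emitLayer_head]
      simp only [emitLayer, List.cons_append, List.nil_append]
      congr 1
      · exact mkGate_congr _ _ _ _ _ (by omega) (by omega)
      congr 1
      · exact mkGate_congr _ _ _ _ _ (by omega) (by omega)
      congr 1
      · exact mkGate_congr _ _ _ _ _ (by omega) (by omega)
      congr 1
      · exact mkGate_congr _ _ _ _ _ (by omega) (by omega)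
      apply List.map_congr_left
      intro j _
      simp only [Function.comp]
      have e : 4 * (c + 1) + j = 4 * c + (4 + j) := by ring
      rw [e]

-- B in the same normal form
lemma fenotipo_alt_norm (xs : List Int) (m : Nat) (hm : xs.length = 3 * m) :
    fenotipo_alt xs = (List.range m).map (fun k => mkGate (tripAt xs k) ((k : Int) + 1) (((k / 4 : Nat) : Int) + 1)) := by
  unfold fenotipo_alt
  rw [chunk3_eq m xs hm]
  have h0 := buildLayers_eq m 0 (tripAt xs)
  simp only [Nat.mul_zero, Nat.cast_zero, zero_add] at h0
  rw [h0]

-- ===== VERDICT (by name: the statement is the Claim_ definition above) =====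
theorem fenotipo_spec : Claim_equal_fenotipo := by
  intro individuo _ hpre
  unfold Spec_fenotipo
  have hpre' : individuo.length % 3 = 0 := hpre
  obtain ⟨m, hm⟩ : ∃ m, individuo.length = 3 * m := ⟨individuo.length / 3, by omega⟩
  rw [fenotipo_norm individuo m hm, fenotipo_alt_norm individuo m hm]
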